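-- pv_equiv track=rewrite | github.com/jramaswami/Binary_Search_Python | equal_piles.py | solve
-- ===== SOURCE A (Python) =====
-- import collections
--
-- def solve(nums):
--     ctr = collections.Counter(nums)
--     curr = 0
--     soln = 0
--     keys = list(sorted(ctr, reverse=True))
--     for k in keys[:-1]:
--         curr += ctr[k]
--         soln += curr
--     return soln
-- ===== SOURCE B (Python) =====
-- def solve(nums):
--     distinct = set(nums)
--     return sum(sum(1 for d in distinct if d < x) for x in nums)
-- ===== Notes on version B (the rewrite author's own statement) =====
-- stated objective: alternative
-- what changed: Drops the Counter and the descending sort entirely: B counts, for each element x of nums, the distinct values strictly below x, and sums these counts; A's prefix-sum over sorted distinct keys equals this pair count.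
import Mathlib
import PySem

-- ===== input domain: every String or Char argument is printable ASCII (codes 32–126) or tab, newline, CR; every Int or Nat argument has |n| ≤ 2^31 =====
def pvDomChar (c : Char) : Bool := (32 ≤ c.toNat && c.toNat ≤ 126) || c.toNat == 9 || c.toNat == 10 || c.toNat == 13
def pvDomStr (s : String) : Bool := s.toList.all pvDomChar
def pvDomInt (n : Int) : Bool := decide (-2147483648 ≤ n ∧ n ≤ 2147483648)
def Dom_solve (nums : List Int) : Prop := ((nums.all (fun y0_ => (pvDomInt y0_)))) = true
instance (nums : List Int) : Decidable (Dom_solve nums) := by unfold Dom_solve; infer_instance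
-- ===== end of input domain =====

-- B replaces Counter + descending sort + prefix accumulation by a direct pair count:
-- for each element x, count the distinct values strictly below x, and sum. Same value, no sort.

-- ===== PORT A =====
-- A: Counter, keys sorted descending, running prefix `curr` summed into `soln` over keys[:-1].
def solve (nums : List Int) : Int :=
  let ctr := PySem.Dict.counter nums
  let keys := PySem.List.sorted ctr.keys (fun x => x) true
  let st := (PySem.List.slice keys none (some (-1))).foldl
    (fun (p : Int × Int) k => (p.1 + ctr.getD k 0, p.2 + (p.1 + ctr.getD k 0))) (0, 0)
  st.2

-- ===== PORT B =====
-- B: distinct = set(nums); sum over x in nums of the number of d in distinct with d < x.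
def solve_alt (nums : List Int) : Int :=
  let distinct := PySem.Set.ofList nums
  (nums.map (fun x => ((distinct.countP (fun d => decide (d < x)) : Nat) : Int))).sum

-- ===== PRECONDITION & SPEC =====
def Spec_solve (nums : List Int) (out : Int) : Prop := out = solve_alt nums
instance (nums : List Int) (out : Int) : Decidable (Spec_solve nums out) := by unfold Spec_solve; infer_instance

-- ===== CLAIM (what is proved, stated in full; the proofs are below) =====
def Claim_equal_solve : Prop := ∀ (nums : List Int), Dom_solve nums → Spec_solve nums (solve nums)

-- ===== LEMMAS AND PROOFS =====

-- ws f P w = f P[0]*w + f P[1]*(w-1) + …  (A's rank-weighted sum with leading weight w)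
def ws (f : Int → Int) : List Int → Int → Int
  | [], _ => 0
  | x :: t, w => f x * w + ws f t (w - 1)

theorem ws_append_singleton (f : Int → Int) (P : List Int) (x : Int) (w : Int) :
    ws f (P ++ [x]) w = ws f P w + f x * (w - P.length) := by
  induction P generalizing w with
  | nil => simp [ws]
  | cons y t ih =>
    simp only [List.cons_append, ws, ih, List.length_cons]
    push_cast; ring_nf

theorem foldl_snd_eq_ws (f : Int → Int) (P : List Int) (c s : Int) :
    (P.foldl (fun (p : Int × Int) k => (p.1 + f k, p.2 + (p.1 + f k))) (c, s)).2
      = s + P.length * c + ws f P P.length := by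
  induction P generalizing c s with
  | nil => simp [ws]
  | cons x t ih =>
    simp only [List.foldl_cons, ih, ws, List.length_cons]
    push_cast; ring_nf

-- A's whole loop is ws over the full key list with leading weight (length - 1).
theorem solve_eq_ws (f : Int → Int) (L : List Int) :
    ((PySem.List.slice L none (some (-1))).foldl
        (fun (p : Int × Int) k => (p.1 + f k, p.2 + (p.1 + f k))) ((0 : Int), (0 : Int))).2
      = ws f L ((L.length : Int) - 1) := by
  rw [PySem.List.slice_to_neg_one, foldl_snd_eq_ws]
  rcases h : L.reverse with _ | ⟨x, r⟩
  · have : L = [] := by simpa using congrArg List.reverse h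
    simp [this, ws]
  · have hk : L = r.reverse ++ [x] := by
      have := congrArg List.reverse h; simpa using this
    rw [hk]
    simp only [List.dropLast_concat, List.length_append, List.length_cons, List.length_nil]
    rw [ws_append_singleton]
    push_cast; ring_nf

-- On a strictly descending list, the rank-weight of k is the number of elements of L below k.
theorem ws_eq_sum_countP (f : Int → Int) (L : List Int) (h : L.Pairwise (· > ·)) :
    ws f L ((L.length : Int) - 1)
      = (L.map (fun k => f k * ((L.countP (fun d => decide (d < k)) : Nat) : Int))).sum := by
  induction L with
  | nil => simp [ws]
  | cons x t ih =>
    rcases List.pairwise_cons.mp h with ⟨hx, ht⟩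
    have hhead : List.countP (fun d => decide (d < x)) (x :: t) = t.length := by
      have ht' : List.countP (fun d => decide (d < x)) t = t.length :=
        List.countP_eq_length.mpr (fun d hd => by simpa using hx d hd)
      simp [ht']
    have htail : (t.map (fun k => f k * (((x :: t).countP (fun d => decide (d < k)) : Nat) : Int)))
        = t.map (fun k => f k * ((t.countP (fun d => decide (d < k)) : Nat) : Int)) := by
      refine List.map_congr_left (fun k hk => ?_)
      have hnlt : ¬ (x < k) := not_lt_of_gt (hx k hk)
      simp [hnlt]
    simp only [ws, List.length_cons, List.map_cons, List.sum_cons, htail]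
    have h0 : (((t.length + 1 : Nat)) : Int) - 1 - 1 = (t.length : Int) - 1 := by omega
    have h1 : (((t.length + 1 : Nat)) : Int) - 1 = (t.length : Int) := by omega
    rw [h0, h1, ih ht, hhead]

-- countP is invariant under permutation of the counted list.
theorem sum_map_countP_perm (f : Int → Int) (L D : List Int) (hp : L.Perm D) :
    (L.map (fun k => f k * ((L.countP (fun d => decide (d < k)) : Nat) : Int))).sum
      = (L.map (fun k => f k * ((D.countP (fun d => decide (d < k)) : Nat) : Int))).sum := by
  refine congrArg List.sum (List.map_congr_left (fun k _ => ?_))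
  rw [hp.countP_eq]

-- splitting a sum over nums at one value k0
theorem sum_map_split (g : Int → Int) (k0 : Int) (nums : List Int) :
    (nums.map g).sum
      = ((nums.count k0 : Nat) : Int) * g k0 + ((nums.filter (fun x => decide (x ≠ k0))).map g).sum := by
  induction nums with
  | nil => simp
  | cons x t ih =>
    by_cases hx : x = k0
    · subst hx
      simp only [List.map_cons, List.sum_cons, List.count_cons_self, List.filter_cons,
        ne_eq, not_true_eq_false, decide_false, ih]
      push_cast; ring
    · simp only [List.map_cons, List.sum_cons, List.filter_cons, ne_eq, hx,
        not_false_eq_true, decide_true, if_true, List.count_cons_of_ne hx, ih]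
      ring

-- Regrouping: a sum over nums equals the count-weighted sum over any Nodup list covering nums.
theorem sum_count_mul (g : Int → Int) (D : List Int) :
    ∀ (nums : List Int), D.Nodup → (∀ x ∈ nums, x ∈ D) →
    (D.map (fun k => ((nums.count k : Nat) : Int) * g k)).sum = (nums.map g).sum := by
  induction D with
  | nil =>
    intro nums _ hcov
    have hnil : nums = [] := List.eq_nil_iff_forall_not_mem.mpr (fun x hx => by simpa using hcov x hx)
    simp [hnil]
  | cons k0 D' ih =>
    intro nums hnd hcov
    rcases List.pairwise_cons.mp hnd with ⟨hk0, hnd'⟩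
    set nums' := nums.filter (fun x => decide (x ≠ k0)) with hn'
    have hcov' : ∀ x ∈ nums', x ∈ D' := by
      intro x hx
      rcases List.mem_filter.mp hx with ⟨hmem, hne⟩
      rcases List.mem_cons.mp (hcov x hmem) with heq | hmem'
      · exact absurd heq (by simpa using hne)
      · exact hmem'
    have hcnt : (D'.map (fun k => ((nums.count k : Nat) : Int) * g k))
        = D'.map (fun k => ((nums'.count k : Nat) : Int) * g k) := by
      refine List.map_congr_left (fun k hk => ?_)
      have hne : ¬ (k = k0) := fun h => (hk0 k hk) h.symm
      rw [hn', List.count_filter]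
      simp [hne]
    simp only [List.map_cons, List.sum_cons, hcnt, ih nums' hnd' hcov']
    exact (sum_map_split g k0 nums).symm

-- ===== VERDICT (by name: the statement is the Claim_ definition above) =====
theorem solve_spec : Claim_equal_solve := by
  intro nums _
  show solve nums = solve_alt nums
  simp only [solve, solve_alt]
  set D : List Int := PySem.Set.ofList nums with hD
  set keys := PySem.List.sorted (PySem.Dict.counter nums).keys (fun x => x) true with hkeys
  have hperm : keys.Perm D := by
    rw [hkeys, hD, ← PySem.Dict.keys_counter]
    exact PySem.List.sorted_perm _ _ _
  have hnodup : keys.Nodup := hperm.nodup_iff.mpr (PySem.Set.nodup_ofList nums)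
  have hdesc : keys.Pairwise (· > ·) := by
    have h1 : keys.Pairwise (fun a b => b ≤ a) := by
      rw [hkeys]; exact PySem.List.sorted_pairwise_rev _ _
    exact (h1.and hnodup).imp (fun hab => lt_of_le_of_ne hab.1 (Ne.symm hab.2))
  rw [solve_eq_ws, ws_eq_sum_countP _ _ hdesc, sum_map_countP_perm _ _ D hperm]
  have hgetD : (keys.map (fun k => (PySem.Dict.counter nums).getD k 0
        * ((D.countP (fun d => decide (d < k)) : Nat) : Int)))
      = keys.map (fun k => ((nums.count k : Nat) : Int)
        * ((D.countP (fun d => decide (d < k)) : Nat) : Int)) := by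
    refine List.map_congr_left (fun k _ => ?_)
    rw [PySem.Dict.getD_counter]
  rw [hgetD,
    (hperm.map (fun k => ((nums.count k : Nat) : Int)
      * ((D.countP (fun d => decide (d < k)) : Nat) : Int))).sum_eq]
  exact sum_count_mul (fun k => ((D.countP (fun d => decide (d < k)) : Nat) : Int)) D nums
    (PySem.Set.nodup_ofList nums)
    (fun x hx => by rw [hD]; exact (PySem.Set.mem_ofList nums x).mpr hx)
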